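-- pv_equiv track=rewrite | github.com/romek-codes/nexusystem | home/scripts/reh/reh/app.py | offset_to_location
-- ===== SOURCE A (Python) =====
-- def offset_to_location(text: str, offset: int) -> tuple[int, int]:
--     lines = text.splitlines(keepends=True)
--     consumed = 0
--     for line_index, line in enumerate(lines):
--         next_consumed = consumed + len(line)
--         if offset < next_consumed:
--             return (line_index, offset - consumed)
--         consumed = next_consumed
--     if lines:
--         last = lines[-1].rstrip("\n")
--         return (len(lines) - 1, len(last))
--     return (0, 0)
-- ===== SOURCE B (Python) =====
-- import bisect
-- from itertools import accumulate
--
--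
-- def offset_to_location(text: str, offset: int) -> tuple[int, int]:
--     lines = text.splitlines(keepends=True)
--     if not lines:
--         return (0, 0)
--     ends = list(accumulate(len(line) for line in lines))
--     i = bisect.bisect_right(ends, offset)
--     if i < len(ends):
--         start = ends[i - 1] if i else 0
--         return (i, offset - start)
--     return (len(lines) - 1, len(lines[-1].rstrip("\n")))
-- ===== Notes on version B (the rewrite author's own statement) =====
-- stated objective: idiomatic
-- what changed: Replaces A's linear enumerate scan with an early return by a cumulative line-end offset table (itertools.accumulate) searched with bisect.bisect_right, keeping the same end-of-text fallback.
import Mathlib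
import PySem

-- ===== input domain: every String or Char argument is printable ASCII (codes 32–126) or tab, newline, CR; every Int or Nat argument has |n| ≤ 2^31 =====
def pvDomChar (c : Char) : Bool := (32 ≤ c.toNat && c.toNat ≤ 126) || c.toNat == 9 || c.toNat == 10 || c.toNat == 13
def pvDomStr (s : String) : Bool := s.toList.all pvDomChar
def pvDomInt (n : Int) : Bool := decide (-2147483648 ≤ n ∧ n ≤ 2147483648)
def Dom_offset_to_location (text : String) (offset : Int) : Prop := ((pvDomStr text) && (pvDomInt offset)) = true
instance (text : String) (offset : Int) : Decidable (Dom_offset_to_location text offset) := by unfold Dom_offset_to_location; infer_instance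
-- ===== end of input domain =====

-- B replaces A's linear scan with early return by a cumulative line-end offset table
-- searched with bisect_right (objective: idiomatic/alternative; same fallback on out-of-range offsets).

-- ===== PORT A =====
-- shared helper: Python str.splitlines(keepends=True), exact (all of CPython's line-boundary
-- characters, '\r\n' kept as one boundary); both Pythons make this same builtin call
def pvIsLineBreak (c : Char) : Bool :=
  c = '\n' || c = '\r' || c.toNat == 11 || c.toNat == 12 || c.toNat == 28 ||
  c.toNat == 29 || c.toNat == 30 || c.toNat == 133 || c.toNat == 8232 || c.toNat == 8233

def pvSplitlinesKeep : List Char → List Char → List (List Char)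
  | [], acc => if acc.isEmpty then [] else [acc.reverse]
  | '\r' :: '\n' :: rest, acc => (acc.reverse ++ ['\r', '\n']) :: pvSplitlinesKeep rest []
  | c :: rest, acc =>
    if pvIsLineBreak c then (acc.reverse ++ [c]) :: pvSplitlinesKeep rest []
    else pvSplitlinesKeep rest (c :: acc)
  termination_by cs _ => cs.length
  decreasing_by all_goals (simp only [List.length_cons]; omega)

-- shared helper: Python s.rstrip("\n") — drop trailing '\n' characters (exact: chars = "\n")
def pvRstripNl (cs : List Char) : List Char := (cs.reverse.dropWhile (· == '\n')).reverse

-- A's for-loop with early return, as a recursion over the lines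
def pvALoop (offset : Int) : List (List Char) → Int → Int → Option (Int × Int)
  | [], _, _ => none
  | line :: rest, idx, consumed =>
    let nc := consumed + (line.length : Int)
    if offset < nc then some (idx, offset - consumed)
    else pvALoop offset rest (idx + 1) nc

def offset_to_location (text : String) (offset : Int) : Int × Int :=
  let lines := pvSplitlinesKeep text.toList []
  match pvALoop offset lines 0 0 with
  | some p => p
  | none =>
    match lines.getLast? with
    | some last => ((lines.length : Int) - 1, ((pvRstripNl last).length : Int))
    | none => (0, 0)

-- ===== PORT B =====
-- itertools.accumulate of the line lengths, starting total s
def pvAccum : List Int → Int → List Int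
  | [], _ => []
  | x :: xs, s => (s + x) :: pvAccum xs (s + x)

def offset_to_location_alt (text : String) (offset : Int) : Int × Int :=
  let lines := pvSplitlinesKeep text.toList []
  if lines.isEmpty then (0, 0)
  else
    let ends := pvAccum (lines.map (fun l => (l.length : Int))) 0
    let i := PySem.List.bisectRight ends offset
    if i < ends.length then
      let start := if i = 0 then 0 else ends.getD (i - 1) 0
      ((i : Int), offset - start)
    else ((lines.length : Int) - 1, ((pvRstripNl (lines.getLastD [])).length : Int))

-- ===== PRECONDITION & SPEC =====
def Spec_offset_to_location (text : String) (offset : Int) (out : Int × Int) : Prop := out = offset_to_location_alt text offset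
instance (text : String) (offset : Int) (out : Int × Int) : Decidable (Spec_offset_to_location text offset out) := by unfold Spec_offset_to_location; infer_instance

-- ===== CLAIM (what is proved, stated in full; the proofs are below) =====
def Claim_equal_offset_to_location : Prop := ∀ (text : String) (offset : Int), Dom_offset_to_location text offset → Spec_offset_to_location text offset (offset_to_location text offset)

-- ===== LEMMAS AND PROOFS =====
theorem pvAccum_length (xs : List Int) (s : Int) : (pvAccum xs s).length = xs.length := by
  induction xs generalizing s with
  | nil => simp [pvAccum]
  | cons x xs ih => simp [pvAccum, ih]

theorem pvAccum_pairwise (xs : List Int) (s : Int) (h : ∀ x ∈ xs, 0 ≤ x) :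
    (pvAccum xs s).Pairwise (fun a b => a ≤ b) := by
  induction xs generalizing s with
  | nil => simp [pvAccum]
  | cons x xs ih =>
    simp only [pvAccum, List.pairwise_cons]
    constructor
    · -- every later partial sum is ≥ s + x
      have key : ∀ (ys : List Int) (t : Int), (∀ y ∈ ys, 0 ≤ y) → ∀ b ∈ pvAccum ys t, t ≤ b := by
        intro ys
        induction ys with
        | nil => intro t _ b hb; simp [pvAccum] at hb
        | cons y ys ih2 =>
          intro t hy b hb
          simp only [pvAccum, List.mem_cons] at hb
          rcases hb with rfl | hb
          · have := hy y (by simp); omega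
          · have := ih2 (t + y) (fun z hz => hy z (by simp [hz])) b hb
            have := hy y (by simp); omega
      exact key xs (s + x) (fun z hz => h z (by simp [hz]))
    · exact ih (s + x) (fun z hz => h z (by simp [hz]))

/-- A's loop, characterised by any index `k` that splits the cumulative ends at `offset`. -/
theorem pvALoop_eq (lines : List (List Char)) (offset c i : Int) (k : Nat)
    (hk : k ≤ lines.length)
    (hlo : ∀ j, j < k → (pvAccum (lines.map (fun l => (l.length : Int))) c).getD j 0 ≤ offset)
    (hhi : ∀ j, k ≤ j → j < lines.length →
      offset < (pvAccum (lines.map (fun l => (l.length : Int))) c).getD j 0) :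
    pvALoop offset lines i c =
      if k < lines.length then
        some (i + (k : Int),
          offset - (if k = 0 then c
                    else (pvAccum (lines.map (fun l => (l.length : Int))) c).getD (k - 1) 0))
      else none := by
  induction lines generalizing c i k with
  | nil =>
    simp at hk
    subst hk
    simp [pvALoop]
  | cons line rest ih =>
    simp only [List.map_cons, pvAccum] at hlo hhi ⊢
    match k with
    | 0 =>
      have h0 : offset < c + (line.length : Int) := by
        have := hhi 0 (by omega) (by simp)
        simpa using this
      simp [pvALoop, h0]
    | k' + 1 =>
      have h0 : c + (line.length : Int) ≤ offset := by
        have := hlo 0 (by omega)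
        simpa using this
      have hnot : ¬ offset < c + (line.length : Int) := by omega
      simp only [pvALoop, hnot, if_false]
      have ih' := ih (c + (line.length : Int)) (i + 1) k'
        (by simpa using hk)
        (fun j hj => by simpa using hlo (j + 1) (by omega))
        (fun j hj hj2 => by simpa using hhi (j + 1) (by omega) (by simpa using hj2))
      rw [ih']
      by_cases hlt : k' < rest.length
      · have hlt' : k' + 1 < rest.length + 1 := by omega
        simp only [List.length_cons, hlt, hlt', if_true, Option.some.injEq, Prod.mk.injEq]
        refine ⟨by push_cast; ring, ?_⟩
        match k' with
        | 0 => simp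
        | k'' + 1 => simp
      · simp [hlt, show ¬ (k' + 1 < rest.length + 1) by omega]

theorem ports_agree (text : String) (offset : Int) :
    offset_to_location text offset = offset_to_location_alt text offset := by
  unfold offset_to_location offset_to_location_alt
  dsimp only
  generalize pvSplitlinesKeep text.toList [] = lines
  match lines with
  | [] => simp [pvALoop]
  | first :: restl =>
    have hne : first :: restl ≠ ([] : List (List Char)) := by simp
    have hlen : (pvAccum (List.map (fun l => (l.length : Int)) (first :: restl)) 0).length
        = (first :: restl).length := by
      rw [pvAccum_length, List.length_map]
    have hsorted : (pvAccum (List.map (fun l => (l.length : Int)) (first :: restl)) 0).Pairwise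
        (fun a b => a ≤ b) := by
      apply pvAccum_pairwise
      intro x hx
      simp only [List.mem_map] at hx
      obtain ⟨l, _, rfl⟩ := hx
      positivity
    obtain ⟨hb1, hb2, hb3⟩ :=
      PySem.List.bisectRight_spec (pvAccum (List.map (fun l => (l.length : Int)) (first :: restl)) 0)
        offset hsorted
    rw [pvALoop_eq (first :: restl) offset 0 0
        (PySem.List.bisectRight (pvAccum (List.map (fun l => (l.length : Int)) (first :: restl)) 0) offset)
        (by omega)
        (fun j hj => by
          have hjlt : j < (pvAccum (List.map (fun l => (l.length : Int)) (first :: restl)) 0).length := by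
            omega
          have := hb2 j hjlt hj
          rwa [List.getD_eq_getElem _ 0 hjlt])
        (fun j hj hj2 => by
          have hjlt : j < (pvAccum (List.map (fun l => (l.length : Int)) (first :: restl)) 0).length := by
            omega
          have := hb3 j hjlt hj
          rwa [List.getD_eq_getElem _ 0 hjlt])]
    simp only [List.isEmpty_cons, Bool.false_eq_true, if_false]
    by_cases hk : PySem.List.bisectRight
        (pvAccum (List.map (fun l => (l.length : Int)) (first :: restl)) 0) offset
        < (first :: restl).length
    · have hk' : PySem.List.bisectRight
          (pvAccum (List.map (fun l => (l.length : Int)) (first :: restl)) 0) offset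
          < (pvAccum (List.map (fun l => (l.length : Int)) (first :: restl)) 0).length := by omega
      simp only [hk, if_true, hk', if_true, zero_add]
    · have hk' : ¬ PySem.List.bisectRight
          (pvAccum (List.map (fun l => (l.length : Int)) (first :: restl)) 0) offset
          < (pvAccum (List.map (fun l => (l.length : Int)) (first :: restl)) 0).length := by omega
      simp only [hk, if_false, hk', if_false]
      rw [List.getLast?_eq_getLast hne, List.getLastD_eq_getLast?, List.getLast?_eq_getLast hne]
      rfl

-- ===== VERDICT (by name: the statement is the Claim_ definition above) =====
theorem offset_to_location_spec : Claim_equal_offset_to_location := by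
  intro text offset _
  unfold Spec_offset_to_location
  exact ports_agree text offset
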